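-- pv_equiv track=rewrite | github.com/ewieczorek/311-pa2 | eff_graphs/graph_maker.py | make_vertices
-- ===== SOURCE A (Python) =====
-- def make_vertices(count):
-- 	v = []
-- 	for i in range(ord('A'), ord('Z')+1):
-- 		for j in range(ord('A'), ord('Z')+1):
-- 			if len(v) >= count:
-- 				break
-- 			v.append("" + chr(i) + "" + chr(j))
-- 	return v
-- ===== SOURCE B (Python) =====
-- def make_vertices(count):
--     n = min(count, 676)
--     return [chr(ord('A') + i // 26) + chr(ord('A') + i % 26) for i in range(n)]
-- ===== Notes on version B (the rewrite author's own statement) =====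
-- stated objective: idiomatic
-- what changed: Replaces the nested alphabet loops with a length-guard break by a single comprehension over range(min(count, 676)) that derives each label directly via i//26 and i%26.
import Mathlib
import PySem

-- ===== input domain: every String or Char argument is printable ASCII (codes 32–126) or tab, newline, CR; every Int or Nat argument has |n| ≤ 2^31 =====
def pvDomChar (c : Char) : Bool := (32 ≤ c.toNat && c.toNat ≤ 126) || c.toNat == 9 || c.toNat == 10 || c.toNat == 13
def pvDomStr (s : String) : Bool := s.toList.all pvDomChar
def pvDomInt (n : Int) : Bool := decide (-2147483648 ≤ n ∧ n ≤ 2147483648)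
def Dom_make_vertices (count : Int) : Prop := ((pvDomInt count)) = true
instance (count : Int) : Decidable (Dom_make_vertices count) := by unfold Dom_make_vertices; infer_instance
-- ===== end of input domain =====

set_option maxRecDepth 10000


-- B replaces A's nested alphabet loops + length-guard break by one pass over range(min(count,676)),
-- deriving each label by i//26 and i%26 (idiomatic; same return value for every int count).

-- ===== PORT A =====
-- "" + chr(i) + "" + chr(j)
def mvLab (i j : Int) : String := "" ++ String.mk [Char.ofNat i.toNat] ++ "" ++ String.mk [Char.ofNat j.toNat]

-- the inner for-j loop; returning v when len(v) >= count is the `break`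
def mvInner (count : Int) (i : Int) : List Int → List String → List String
  | [], v => v
  | j :: rest, v =>
      if (v.length : Int) ≥ count then v
      else mvInner count i rest (v ++ [mvLab i j])

def make_vertices (count : Int) : List String :=
  (PySem.List.pyRange 65 91 1).foldl
    (fun v i => mvInner count i (PySem.List.pyRange 65 91 1) v) []

-- ===== PORT B =====
def make_vertices_alt (count : Int) : List String :=
  (PySem.List.pyRange 0 (min count 676) 1).map (fun i =>
    String.mk [Char.ofNat (65 + PySem.Int.floordiv i 26).toNat] ++
    String.mk [Char.ofNat (65 + PySem.Int.mod i 26).toNat])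

-- ===== PRECONDITION & SPEC =====
def Spec_make_vertices (count : Int) (out : List String) : Prop := out = make_vertices_alt count
instance (count : Int) (out : List String) : Decidable (Spec_make_vertices count out) := by unfold Spec_make_vertices; infer_instance

-- ===== CLAIM (what is proved, stated in full; the proofs are below) =====
def Claim_equal_make_vertices : Prop := ∀ (count : Int), Dom_make_vertices count → Spec_make_vertices count (make_vertices count)

-- ===== LEMMAS AND PROOFS =====

def labN (k : Nat) : String := String.mk [Char.ofNat (65 + k / 26)] ++ String.mk [Char.ofNat (65 + k % 26)]
def bigList : List String := (List.range 676).map labN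

lemma mvInner_eq (count i : Int) (js : List Int) (v : List String) :
    mvInner count i js v = v ++ (js.map (mvLab i)).take (count - v.length).toNat := by
  induction js generalizing v with
  | nil => simp [mvInner]
  | cons j rest ih =>
    by_cases h : (v.length : Int) ≥ count
    · have : (count - (v.length : Int)).toNat = 0 := by omega
      simp [mvInner, h, this]
    · have hpos : (count - (v.length : Int)).toNat = (count - ((v.length : Int) + 1)).toNat + 1 := by omega
      simp only [mvInner, if_neg h, ih, List.map_cons, hpos, List.take_succ_cons]
      simp

lemma foldl_take_eq (count : Int) (rows : List (List String)) (v : List String) :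
    rows.foldl (fun v row => v ++ row.take (count - v.length).toNat) v
      = v ++ rows.flatten.take (count - v.length).toNat := by
  induction rows generalizing v with
  | nil => simp
  | cons row rest ih =>
    simp only [List.foldl_cons, ih, List.flatten_cons, List.take_append, List.append_assoc]
    congr 2
    congr 1
    simp only [List.length_append, List.length_take]
    omega

lemma make_vertices_eq_take (count : Int) :
    make_vertices count = bigList.take count.toNat := by
  have hfun : (fun v i => mvInner count i (PySem.List.pyRange 65 91 1) v)
      = (fun (v : List String) (i : Int) =>
          v ++ ((PySem.List.pyRange 65 91 1).map (mvLab i)).take (count - v.length).toNat) := by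
    funext v i; exact mvInner_eq count i _ v
  have hmap := List.foldl_map
    (f := fun i : Int => (PySem.List.pyRange 65 91 1).map (mvLab i))
    (g := fun (v : List String) (row : List String) => v ++ row.take (count - v.length).toNat)
    (l := PySem.List.pyRange 65 91 1)
    (init := ([] : List String))
  have hbig : ((PySem.List.pyRange 65 91 1).map
      (fun i => (PySem.List.pyRange 65 91 1).map (mvLab i))).flatten = bigList := by rfl
  calc make_vertices count
      = ((PySem.List.pyRange 65 91 1).map
          (fun i => (PySem.List.pyRange 65 91 1).map (mvLab i))).foldl
          (fun v row => v ++ row.take (count - v.length).toNat) [] := by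
        rw [make_vertices, hfun, hmap]
    _ = bigList.take count.toNat := by
        rw [foldl_take_eq, hbig]; simp

lemma alt_eq_take (count : Int) :
    make_vertices_alt count = bigList.take (min count 676).toNat := by
  rw [make_vertices_alt, PySem.List.pyRange_one, List.map_map]
  have hz : ((676 : Int) - 0).toNat = 676 := by omega
  have hsub : ((min count 676 : Int) - 0) = min count 676 := by omega
  rw [hsub]
  have : bigList.take (min count 676).toNat
      = (List.range (min count 676).toNat).map labN := by
    rw [bigList, ← List.map_take, List.take_range]
    congr 2
    omega
  rw [this]
  apply List.map_congr_left
  intro k _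
  simp only [Function.comp, labN, zero_add]
  rw [show (26 : Int) = ((26 : Nat) : Int) from rfl]
  rw [PySem.Int.floordiv_natCast, PySem.Int.mod_natCast]
  have h1 : (65 + ((k / 26 : Nat) : Int)).toNat = 65 + k / 26 := by omega
  have h2 : (65 + ((k % 26 : Nat) : Int)).toNat = 65 + k % 26 := by omega
  rw [h1, h2]

-- ===== VERDICT (by name: the statement is the Claim_ definition above) =====
theorem make_vertices_spec : Claim_equal_make_vertices := by
  intro count _
  unfold Spec_make_vertices
  rw [make_vertices_eq_take, alt_eq_take]
  have hlen : bigList.length = 676 := by simp [bigList]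
  by_cases h : count ≤ 676
  · congr 1; omega
  · rw [List.take_of_length_le (by omega), List.take_of_length_le (by omega)]
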